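-- pv_equiv track=rewrite | github.com/samuelthaiyil/algorithms | python/stacks/9.py | applyOps
-- ===== SOURCE A (Python) =====
-- def applyOps(ops):
--     stack = []
--     sum = 0
--
--     for o in ops:
--         if o.startswith("-") or o.isdigit():
--             stack.append(int(o))
--         elif o == "+":
--             val1 = stack[-1] if stack[-1] is not None else 0
--             val2 = stack[-2] if stack[-2] is not None else 0
--
--             stack.append((int(val1) + int(val2)))
--         elif o == "D":
--             val1 = stack[-1] if stack[-1] is not None else 0
--
--             stack.append((int(val1) * 2))
--         elif o == "C":
--             stack.pop()
--
--     for el in stack: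
--         sum += int(el)
--
--     return sum
-- ===== SOURCE B (Python) =====
-- def applyOps(ops):
--     # backward cancellation pass: each "C" cancels the nearest preceding
--     # value-producing op (every op except "C" pushes exactly one value)
--     kept = []
--     skip = 0
--     for o in reversed(ops):
--         if o == "C":
--             skip += 1
--         elif o.startswith("-") or o.isdigit() or o == "+" or o == "D":
--             if skip:
--                 skip -= 1
--             else:
--                 kept.append(o)
--     kept.reverse()
--     # forward pass over the surviving ops: nothing is ever popped,
--     # so a running total of everything pushed is the answer
--     stack = []
--     total = 0
--     for o in kept:
--         if o.startswith("-") or o.isdigit():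
--             v = int(o)
--         elif o == "+":
--             v = stack[-1] + stack[-2]
--         else:  # "D"
--             v = 2 * stack[-1]
--         stack.append(v)
--         total += v
--     return total
-- ===== Notes on version B (the rewrite author's own statement) =====
-- stated objective: alternative
-- what changed: B never executes 'C' against a live stack: a backward pass first resolves each 'C' against the nearest preceding value-producing op (backspace-compare style), then a forward pass evaluates the surviving ops, where nothing is ever popped, into a running total.
import Mathlib
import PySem

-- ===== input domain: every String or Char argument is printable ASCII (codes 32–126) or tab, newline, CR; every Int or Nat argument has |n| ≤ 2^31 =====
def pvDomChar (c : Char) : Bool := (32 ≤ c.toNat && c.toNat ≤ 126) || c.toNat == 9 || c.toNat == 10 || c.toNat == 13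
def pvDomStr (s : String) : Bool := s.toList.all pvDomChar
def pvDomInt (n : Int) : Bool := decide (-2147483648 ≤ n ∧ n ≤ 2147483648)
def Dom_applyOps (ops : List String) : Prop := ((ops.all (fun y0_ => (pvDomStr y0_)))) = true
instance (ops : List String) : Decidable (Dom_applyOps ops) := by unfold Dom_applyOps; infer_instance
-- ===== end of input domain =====

-- B replaces A's live-stack simulation of "C" by a backward cancellation pass (each "C"
-- cancels the nearest preceding value-producing op) followed by a pop-free forward
-- evaluation into a running total; proved equal in return value on all non-raising inputs.

-- shared token classification: o.startswith("-") or o.isdigit()  (literally in both sources)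
def pvIsPush (o : String) : Bool := PySem.Str.startswith o "-" || PySem.Str.strIsdigit o

-- ===== PORT A =====
-- one loop iteration of A: grow/shrink the appended-at-the-end stack; none = the Python raised
def applyOpsStepA : Option (List Int) → String → Option (List Int)
  | none, _ => none
  | some stack, o =>
    if pvIsPush o then
      match PySem.Int.ofStr? o with          -- int(o); none = ValueError
      | some n => some (stack ++ [n])
      | none => none
    else if o = "+" then
      match PySem.List.pyGet? stack (-1), PySem.List.pyGet? stack (-2) with
      | some v1, some v2 => some (stack ++ [v1 + v2])
      | _, _ => none                          -- IndexError
    else if o = "D" then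
      match PySem.List.pyGet? stack (-1) with
      | some v1 => some (stack ++ [v1 * 2])
      | none => none                          -- IndexError
    else if o = "C" then
      match PySem.List.pop? stack (-1) with
      | some p => some p.2
      | none => none                          -- IndexError on pop of []
    else some stack

def applyOps (ops : List String) : Int :=
  match ops.foldl applyOpsStepA (some []) with
  | some stack => stack.foldl (fun s el => s + el) 0   -- second pass: for el in stack: sum += el
  | none => 0                                          -- unreachable under Pre_applyOps

-- ===== PORT B =====
-- backward pass (the Python iterates reversed(ops) and reverses kept at the end = foldr):
-- "C" raises the cancellation count, a value-producing op is either cancelled or kept,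
-- anything else is a no-op and is dropped
def pvKeepB (o : String) (st : List String × Nat) : List String × Nat :=
  if o = "C" then (st.1, st.2 + 1)
  else if pvIsPush o = true ∨ o = "+" ∨ o = "D" then
    if 0 < st.2 then (st.1, st.2 - 1) else (o :: st.1, st.2)
  else st

-- forward pass over the surviving ops: every op pushes, nothing is popped, total runs along;
-- the final else is the Python's "D" branch (stack[-1] on empty stack = IndexError = none)
def pvEvalB : List String → List Int → Int → Option Int
  | [], _, t => some t
  | o :: ks, stack, t =>
    if pvIsPush o then
      match PySem.Int.ofStr? o with
      | some v => pvEvalB ks (v :: stack) (t + v)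
      | none => none
    else if o = "+" then
      match stack with
      | v1 :: v2 :: _ => pvEvalB ks ((v1 + v2) :: stack) (t + (v1 + v2))
      | _ => none
    else
      match stack with
      | v1 :: _ => pvEvalB ks (2 * v1 :: stack) (t + 2 * v1)
      | [] => none

def applyOps_alt (ops : List String) : Int :=
  match pvEvalB (ops.foldr pvKeepB ([], 0)).1 [] 0 with
  | some t => t
  | none => 0

-- ===== PRECONDITION & SPEC =====
-- shape check only (parseability of pushed tokens and enough stack depth, tracked as a counter):
-- exactly the inputs on which Python A returns without ValueError/IndexError
def pvOpsOk : Nat → List String → Bool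
  | _, [] => true
  | d, o :: rest =>
    if pvIsPush o then
      (PySem.Int.ofStr? o).isSome && pvOpsOk (d + 1) rest
    else if o = "+" then
      decide (2 ≤ d) && pvOpsOk (d + 1) rest
    else if o = "D" then
      decide (1 ≤ d) && pvOpsOk (d + 1) rest
    else if o = "C" then
      decide (1 ≤ d) && pvOpsOk (d - 1) rest
    else pvOpsOk d rest

-- Pre_ excludes exactly the inputs on which A raises (int() ValueError on a pushed token,
-- IndexError from "+"/"D" on a too-shallow stack or "C" on an empty stack)
def Pre_applyOps (ops : List String) : Prop := pvOpsOk 0 ops = true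

instance (ops : List String) : Decidable (Pre_applyOps ops) := by
  unfold Pre_applyOps; infer_instance

def pvWitness_applyOps : List String := ["5", "-3", "+", "D", "C", "x"]

def Spec_applyOps (ops : List String) (out : Int) : Prop := out = applyOps_alt ops
instance (ops : List String) (out : Int) : Decidable (Spec_applyOps ops out) := by
  unfold Spec_applyOps; infer_instance

-- ===== CLAIM (what is proved, stated in full; the proofs are below) =====
def Claim_equal_applyOps : Prop :=
  ∀ (ops : List String), Dom_applyOps ops → Pre_applyOps ops → Spec_applyOps ops (applyOps ops)

-- ===== LEMMAS AND PROOFS =====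

-- proof-side intermediates: A's loop re-expressed on a cons (top-first) stack, and
-- B's forward pass with the total stripped off (stack only)
def pvSimC : List String → List Int → Option (List Int)
  | [], r => some r
  | o :: rest, r =>
    if pvIsPush o then
      match PySem.Int.ofStr? o with
      | some n => pvSimC rest (n :: r)
      | none => none
    else if o = "+" then
      match r with
      | v1 :: v2 :: _ => pvSimC rest ((v1 + v2) :: r)
      | _ => none
    else if o = "D" then
      match r with
      | v1 :: _ => pvSimC rest (v1 * 2 :: r)
      | [] => none
    else if o = "C" then
      match r with
      | _ :: rr => pvSimC rest rr
      | [] => none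
    else pvSimC rest r

def pvEvalNC : List String → List Int → Option (List Int)
  | [], r => some r
  | o :: ks, r =>
    if pvIsPush o then
      match PySem.Int.ofStr? o with
      | some v => pvEvalNC ks (v :: r)
      | none => none
    else if o = "+" then
      match r with
      | v1 :: v2 :: _ => pvEvalNC ks ((v1 + v2) :: r)
      | _ => none
    else
      match r with
      | v1 :: _ => pvEvalNC ks (2 * v1 :: r)
      | [] => none

lemma pvFoldlAdd (l : List Int) (t : Int) :
    l.foldl (fun s el => s + el) t = t + l.sum := by
  induction l generalizing t with
  | nil => simp
  | cons x xs ih => simp [List.foldl, ih, add_assoc]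

-- A's append-at-the-end loop is pvSimC on the reversed stack (on ok inputs)
lemma pvSimRel (ops : List String) : ∀ (r : List Int),
    pvOpsOk r.length ops = true →
    ∃ r', ops.foldl applyOpsStepA (some r.reverse) = some r'.reverse ∧
          pvSimC ops r = some r' := by
  induction ops with
  | nil =>
    intro r _
    exact ⟨r, by simp, by simp [pvSimC]⟩
  | cons o rest ih =>
    intro r hok
    unfold pvOpsOk at hok
    by_cases hp : pvIsPush o = true
    · rw [if_pos hp] at hok
      obtain ⟨hsome, hrest⟩ := Bool.and_eq_true_iff.mp hok
      obtain ⟨n, hn⟩ := Option.isSome_iff_exists.mp hsome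
      have hstepA : applyOpsStepA (some r.reverse) o = some ((n :: r).reverse) := by
        simp only [applyOpsStepA]
        rw [hp, if_pos rfl, hn, List.reverse_cons]
      have hstepC : pvSimC (o :: rest) r = pvSimC rest (n :: r) := by
        simp only [pvSimC]
        rw [hp, if_pos rfl, hn]
      obtain ⟨r', hA, hC⟩ := ih (n :: r) (by simpa using hrest)
      exact ⟨r', by rw [List.foldl_cons, hstepA]; exact hA, by rw [hstepC]; exact hC⟩
    · have hpf : pvIsPush o = false := by simpa using hp
      rw [if_neg hp] at hok
      by_cases hplus : o = "+"
      · rw [if_pos hplus] at hok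
        obtain ⟨hd, hrest⟩ := Bool.and_eq_true_iff.mp hok
        have hd2 : 2 ≤ r.length := by simpa using hd
        match r, hd2 with
        | v1 :: v2 :: rr, _ =>
          have h1 : PySem.List.pyGet? ((v1 :: v2 :: rr) : List Int).reverse (-1) = some v1 := by
            rw [PySem.List.pyGet?_neg_one]
            simp
          have h2 : PySem.List.pyGet? ((v1 :: v2 :: rr) : List Int).reverse (-2) = some v2 := by
            rw [PySem.List.pyGet?_neg_ofNat _ 2 (by omega) (by simp)]
            rw [List.getElem?_reverse (by simp)]
            simp
          have hstepA : applyOpsStepA (some ((v1 :: v2 :: rr) : List Int).reverse) o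
              = some (((v1 + v2) :: v1 :: v2 :: rr : List Int).reverse) := by
            simp only [applyOpsStepA]
            rw [hpf, if_neg (by simp), if_pos hplus, h1, h2]
            simp
          have hstepC : pvSimC (o :: rest) (v1 :: v2 :: rr)
              = pvSimC rest ((v1 + v2) :: v1 :: v2 :: rr) := by
            simp only [pvSimC]
            rw [hpf, if_neg (by simp), if_pos hplus]
          obtain ⟨r', hA, hC⟩ := ih ((v1 + v2) :: v1 :: v2 :: rr) (by simpa using hrest)
          exact ⟨r', by rw [List.foldl_cons, hstepA]; exact hA, by rw [hstepC]; exact hC⟩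
      · rw [if_neg hplus] at hok
        by_cases hD : o = "D"
        · rw [if_pos hD] at hok
          obtain ⟨hd, hrest⟩ := Bool.and_eq_true_iff.mp hok
          have hd1 : 1 ≤ r.length := by simpa using hd
          match r, hd1 with
          | v1 :: rr, _ =>
            have h1 : PySem.List.pyGet? ((v1 :: rr) : List Int).reverse (-1) = some v1 := by
              rw [PySem.List.pyGet?_neg_one]
              simp
            have hstepA : applyOpsStepA (some ((v1 :: rr) : List Int).reverse) o
                = some ((v1 * 2 :: v1 :: rr : List Int).reverse) := by
              simp only [applyOpsStepA]
              rw [hpf, if_neg (by simp), if_neg hplus, if_pos hD, h1]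
              simp
            have hstepC : pvSimC (o :: rest) (v1 :: rr)
                = pvSimC rest (v1 * 2 :: v1 :: rr) := by
              simp only [pvSimC]
              rw [hpf, if_neg (by simp), if_neg hplus, if_pos hD]
            obtain ⟨r', hA, hC⟩ := ih (v1 * 2 :: v1 :: rr) (by simpa using hrest)
            exact ⟨r', by rw [List.foldl_cons, hstepA]; exact hA, by rw [hstepC]; exact hC⟩
        · rw [if_neg hD] at hok
          by_cases hC : o = "C"
          · rw [if_pos hC] at hok
            obtain ⟨hd, hrest⟩ := Bool.and_eq_true_iff.mp hok
            have hd1 : 1 ≤ r.length := by simpa using hd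
            match r, hd1 with
            | v :: rr, _ =>
              have hpop : PySem.List.pop? ((v :: rr) : List Int).reverse (-1)
                  = some (v, rr.reverse) := by
                rw [List.reverse_cons]
                exact PySem.List.pop?_last rr.reverse v
              have hstepA : applyOpsStepA (some ((v :: rr) : List Int).reverse) o
                  = some (rr.reverse) := by
                simp only [applyOpsStepA]
                rw [hpf, if_neg (by simp), if_neg hplus, if_neg hD, if_pos hC, hpop]
              have hstepC : pvSimC (o :: rest) (v :: rr) = pvSimC rest rr := by
                simp only [pvSimC]
                rw [hpf, if_neg (by simp), if_neg hplus, if_neg hD, if_pos hC]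
              obtain ⟨r', hA, hCC⟩ := ih rr (by simpa using hrest)
              exact ⟨r', by rw [List.foldl_cons, hstepA]; exact hA, by rw [hstepC]; exact hCC⟩
          · rw [if_neg hC] at hok
            have hstepA : applyOpsStepA (some r.reverse) o = some r.reverse := by
              simp only [applyOpsStepA]
              rw [hpf, if_neg (by simp), if_neg hplus, if_neg hD, if_neg hC]
            have hstepC : pvSimC (o :: rest) r = pvSimC rest r := by
              simp only [pvSimC]
              rw [hpf, if_neg (by simp), if_neg hplus, if_neg hD, if_neg hC]
            obtain ⟨r', hA, hCC⟩ := ih r hok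
            exact ⟨r', by rw [List.foldl_cons, hstepA]; exact hA, by rw [hstepC]; exact hCC⟩

-- the backward pass is sound: evaluating ops with cancellations equals evaluating the
-- kept ops (cancellation-free) on the stack with the uncancelled "C"s' victims dropped
lemma pvFiltRel (ops : List String) : ∀ (r : List Int),
    pvOpsOk r.length ops = true →
    pvSimC ops r
      = pvEvalNC (ops.foldr pvKeepB ([], 0)).1 (r.drop (ops.foldr pvKeepB ([], 0)).2) := by
  induction ops with
  | nil =>
    intro r _
    simp [pvSimC, pvEvalNC]
  | cons o rest ih =>
    intro r hok
    unfold pvOpsOk at hok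
    rw [List.foldr_cons]
    rcases hFR : rest.foldr pvKeepB ([], 0) with ⟨k', s'⟩
    by_cases hp : pvIsPush o = true
    · rw [if_pos hp] at hok
      obtain ⟨hsome, hrest⟩ := Bool.and_eq_true_iff.mp hok
      obtain ⟨n, hn⟩ := Option.isSome_iff_exists.mp hsome
      have hoC : o ≠ "C" := by
        intro h; rw [h] at hp; exact absurd hp (by decide)
      have hsim : pvSimC (o :: rest) r = pvSimC rest (n :: r) := by
        simp only [pvSimC]
        rw [hp, if_pos rfl, hn]
      have hIH := ih (n :: r) (by simpa using hrest)
      rw [hFR] at hIH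
      rw [hsim, hIH]
      simp only [pvKeepB, if_neg hoC, if_pos (Or.inl hp)]
      cases s' with
      | zero =>
        rw [if_neg (by omega : ¬ (0:Nat) < 0)]
        simp only [List.drop_zero, pvEvalNC]
        rw [hp, if_pos rfl, hn]
      | succ m =>
        rw [if_pos (by omega : 0 < m + 1)]
        simp [List.drop_succ_cons]
    · have hpf : pvIsPush o = false := by simpa using hp
      rw [if_neg hp] at hok
      by_cases hplus : o = "+"
      · rw [if_pos hplus] at hok
        obtain ⟨hd, hrest⟩ := Bool.and_eq_true_iff.mp hok
        have hd2 : 2 ≤ r.length := by simpa using hd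
        match r, hd2 with
        | v1 :: v2 :: rr, _ =>
          have hsim : pvSimC (o :: rest) (v1 :: v2 :: rr)
              = pvSimC rest ((v1 + v2) :: v1 :: v2 :: rr) := by
            simp only [pvSimC]
            rw [hpf, if_neg (by simp), if_pos hplus]
          have hIH := ih ((v1 + v2) :: v1 :: v2 :: rr) (by simpa using hrest)
          rw [hFR] at hIH
          rw [hsim, hIH]
          simp only [pvKeepB, if_neg (show o ≠ "C" by rw [hplus]; decide),
            if_pos (Or.inr (Or.inl hplus))]
          cases s' with
          | zero =>
            rw [if_neg (by omega : ¬ (0:Nat) < 0)]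
            simp only [List.drop_zero, pvEvalNC]
            rw [hpf, if_neg (by simp), if_pos hplus]
          | succ m =>
            rw [if_pos (by omega : 0 < m + 1)]
            simp [List.drop_succ_cons]
      · rw [if_neg hplus] at hok
        by_cases hD : o = "D"
        · rw [if_pos hD] at hok
          obtain ⟨hd, hrest⟩ := Bool.and_eq_true_iff.mp hok
          have hd1 : 1 ≤ r.length := by simpa using hd
          match r, hd1 with
          | v1 :: rr, _ =>
            have hsim : pvSimC (o :: rest) (v1 :: rr)
                = pvSimC rest (v1 * 2 :: v1 :: rr) := by
              simp only [pvSimC]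
              rw [hpf, if_neg (by simp), if_neg hplus, if_pos hD]
            have hIH := ih (v1 * 2 :: v1 :: rr) (by simpa using hrest)
            rw [hFR] at hIH
            rw [hsim, hIH]
            simp only [pvKeepB, if_neg (show o ≠ "C" by rw [hD]; decide),
              if_pos (Or.inr (Or.inr hD))]
            cases s' with
            | zero =>
              rw [if_neg (by omega : ¬ (0:Nat) < 0)]
              simp only [List.drop_zero, pvEvalNC]
              rw [hpf, if_neg (by simp), if_neg hplus, mul_comm v1 2]
            | succ m =>
              rw [if_pos (by omega : 0 < m + 1)]
              simp [List.drop_succ_cons]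
        · rw [if_neg hD] at hok
          by_cases hC : o = "C"
          · rw [if_pos hC] at hok
            obtain ⟨hd, hrest⟩ := Bool.and_eq_true_iff.mp hok
            have hd1 : 1 ≤ r.length := by simpa using hd
            match r, hd1 with
            | v :: rr, _ =>
              have hsim : pvSimC (o :: rest) (v :: rr) = pvSimC rest rr := by
                simp only [pvSimC]
                rw [hpf, if_neg (by simp), if_neg hplus, if_neg hD, if_pos hC]
              have hIH := ih rr (by simpa using hrest)
              rw [hFR] at hIH
              rw [hsim, hIH]
              simp only [pvKeepB, if_pos hC]
              simp [List.drop_succ_cons]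
          · rw [if_neg hC] at hok
            have hsim : pvSimC (o :: rest) r = pvSimC rest r := by
              simp only [pvSimC]
              rw [hpf, if_neg (by simp), if_neg hplus, if_neg hD, if_neg hC]
            have hIH := ih r hok
            rw [hFR] at hIH
            rw [hsim, hIH]
            simp only [pvKeepB, if_neg hC,
              if_neg (show ¬ (pvIsPush o = true ∨ o = "+" ∨ o = "D") by
                intro h; rcases h with h | h | h
                · exact absurd h hp
                · exact hplus h
                · exact hD h)]

-- the running total of B's forward pass is the sum delta of the stack
lemma pvEvalBtotal (ks : List String) : ∀ (r : List Int) (t : Int) (r' : List Int),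
    pvEvalNC ks r = some r' →
    pvEvalB ks r t = some (t + (r'.sum - r.sum)) := by
  induction ks with
  | nil =>
    intro r t r' h
    simp only [pvEvalNC, Option.some.injEq] at h
    subst h
    simp [pvEvalB]
  | cons o ks ih =>
    intro r t r' h
    simp only [pvEvalNC, pvEvalB] at h ⊢
    by_cases hp : pvIsPush o = true
    · rw [if_pos hp] at h ⊢
      cases hv : PySem.Int.ofStr? o with
      | none => rw [hv] at h; exact absurd h (by simp)
      | some v =>
        rw [hv] at h
        dsimp only at h ⊢
        rw [ih (v :: r) (t + v) r' h]
        congr 1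
        simp
        ring
    · rw [if_neg hp] at h ⊢
      by_cases hplus : o = "+"
      · rw [if_pos hplus] at h ⊢
        match r with
        | [] => exact absurd h (by simp)
        | [v] => exact absurd h (by simp)
        | v1 :: v2 :: rr =>
          dsimp only at h ⊢
          rw [ih _ _ r' h]
          congr 1
          simp
          ring
      · rw [if_neg hplus] at h ⊢
        match r with
        | [] => exact absurd h (by simp)
        | v1 :: rr =>
          dsimp only at h ⊢
          rw [ih _ _ r' h]
          congr 1
          simp
          ring

-- ===== VERDICT (by name: the statement is the Claim_ definition above) =====
theorem applyOps_spec : Claim_equal_applyOps := by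
  intro ops _ hpre
  unfold Spec_applyOps
  obtain ⟨r', hA, hS⟩ := pvSimRel ops [] hpre
  have hF := pvFiltRel ops [] hpre
  rw [hS] at hF
  simp only [List.drop_nil] at hF
  have hB := pvEvalBtotal (ops.foldr pvKeepB ([], 0)).1 [] 0 r' hF.symm
  unfold applyOps applyOps_alt
  rw [show (some [] : Option (List Int)) = some (([] : List Int).reverse) by simp, hA, hB]
  dsimp only
  rw [pvFoldlAdd]
  simp
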